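-- pv_equiv track=rewrite | github.com/AmberElferink/VRshoesDataProcessing | filterdata.py | BoolSectionDef
-- ===== SOURCE A (Python) =====
-- def BoolSectionDef(list, valueToLabelSection):
--     currSign = list[0]
--     sectionNr = 0
--     sectionNrList = []
--
--     currSectionStartIdx = 0
--     sectionNrToFirstLastIdx = {} # will contain first id and last id of current section
--
--     if list[0] == valueToLabelSection:
--         sectionNr = 1
--     for i in range(0, len(list)):
--         if list[i] != currSign:
--             if list[i] == valueToLabelSection: # >0 means tracking is working, this is a new section with broken tracking
--                 sectionNr +=1
--                 currSectionStartIdx = i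
--             else: # value goes to label that should not be added as section, add this as section end
--                 sectionNrToFirstLastIdx[sectionNr] = [currSectionStartIdx, i]
--         currSign = list[i]
--
--         if list[i] > valueToLabelSection:
--             sectionNrList.append(sectionNr)
--         else:
--             sectionNrList.append(0)
--     return sectionNrList, sectionNr, sectionNrToFirstLastIdx
-- ===== SOURCE B (Python) =====
-- from itertools import groupby
--
--
-- def BoolSectionDef(list, valueToLabelSection):
--     # Split into runs of consecutive equal values: (value, start index, length).
--     runs = []
--     idx = 0
--     for val, grp in groupby(list):
--         n = sum(1 for _ in grp)
--         runs.append((val, idx, n))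
--         idx += n
--
--     sectionNr = 1 if list[0] == valueToLabelSection else 0
--     currSectionStartIdx = 0
--     sectionNrToFirstLastIdx = {}
--
--     val0, _, n0 = runs[0]
--     sectionNrList = [sectionNr if val0 > valueToLabelSection else 0] * n0
--     for val, start, n in runs[1:]:
--         if val == valueToLabelSection:
--             sectionNr += 1
--             currSectionStartIdx = start
--         else:
--             sectionNrToFirstLastIdx[sectionNr] = [currSectionStartIdx, start]
--         sectionNrList.extend([sectionNr if val > valueToLabelSection else 0] * n)
--     return sectionNrList, sectionNr, sectionNrToFirstLastIdx
-- ===== Notes on version B (the rewrite author's own statement) =====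
-- stated objective: idiomatic
-- what changed: B first splits the list into runs of consecutive equal values (itertools.groupby with start indices) and replays the section transitions once per run, expanding each run's label by multiplication, instead of A's per-element loop that re-tests the previous sign at every index.
import Mathlib
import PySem

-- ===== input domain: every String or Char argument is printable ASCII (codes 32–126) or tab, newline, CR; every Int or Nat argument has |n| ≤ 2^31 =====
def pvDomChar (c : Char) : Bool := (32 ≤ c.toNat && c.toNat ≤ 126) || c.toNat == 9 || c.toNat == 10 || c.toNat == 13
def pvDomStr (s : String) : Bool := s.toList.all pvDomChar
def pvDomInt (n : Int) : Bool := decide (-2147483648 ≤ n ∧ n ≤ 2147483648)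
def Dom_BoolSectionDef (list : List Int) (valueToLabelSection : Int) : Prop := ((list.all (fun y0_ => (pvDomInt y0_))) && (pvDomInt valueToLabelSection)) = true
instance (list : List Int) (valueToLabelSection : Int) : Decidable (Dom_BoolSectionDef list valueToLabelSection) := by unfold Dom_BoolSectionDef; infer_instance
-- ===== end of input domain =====

-- B labels the list by first splitting it into runs of consecutive equal values (groupby) and
-- replaying the section transitions once per run instead of once per element (objective: idiomatic).


-- ===== PORT A =====
-- one iteration of A's `for i in range(0, len(list))` loop; state = (currSign, sectionNr, currSectionStartIdx, dict, sectionNrList)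
def pvStepA (v : Int) (st : Int × Int × Int × PySem.Dict Int (List Int) × List Int) (p : Int × Int) :
    Int × Int × Int × PySem.Dict Int (List Int) × List Int :=
  let curr := st.1; let sNr := st.2.1; let cs := st.2.2.1; let d := st.2.2.2.1; let labels := st.2.2.2.2
  let i := p.1; let x := p.2
  if x ≠ curr then
    if x = v then (x, sNr + 1, i, d, labels ++ [if x > v then sNr + 1 else 0])
    else (x, sNr, cs, d.insert sNr [cs, i], labels ++ [if x > v then sNr else 0])
  else (x, sNr, cs, d, labels ++ [if x > v then sNr else 0])

def BoolSectionDef (list : List Int) (valueToLabelSection : Int) : List Int × Int × (List (Int × List Int)) :=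
  let curr := list.headD 0                          -- list[0]; on [] Python raises IndexError (excluded by Pre_)
  let sNr : Int := if curr = valueToLabelSection then 1 else 0
  let st := (PySem.List.enumerate list 0).foldl (pvStepA valueToLabelSection) (curr, sNr, 0, PySem.Dict.empty, [])
  (st.2.2.2.2, st.2.1, st.2.2.2.1.items)

-- ===== PORT B =====
-- itertools.groupby with start indices: runs of consecutive equal values as (value, start, length)
def pvRuns : List Int → Int → List (Int × Int × Nat)
  | [], _ => []
  | x :: xs, i =>
    match pvRuns xs (i + 1) with
    | [] => [(x, i, 1)]
    | (w, s, n) :: rs => if x = w then (x, i, n + 1) :: rs else (x, i, 1) :: (w, s, n) :: rs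

-- B's `for val, start, n in runs[1:]` loop; state = (sectionNr, currSectionStartIdx, dict, sectionNrList)
def pvProcB (v : Int) : (Int × Int × PySem.Dict Int (List Int) × List Int) → List (Int × Int × Nat) →
    Int × Int × PySem.Dict Int (List Int) × List Int
  | st, [] => st
  | (sNr, cs, d, labels), (x, s, n) :: rs =>
    if x = v then
      pvProcB v (sNr + 1, s, d, labels ++ List.replicate n (if x > v then sNr + 1 else 0)) rs
    else
      pvProcB v (sNr, cs, d.insert sNr [cs, s], labels ++ List.replicate n (if x > v then sNr else 0)) rs

def BoolSectionDef_alt (list : List Int) (valueToLabelSection : Int) : List Int × Int × (List (Int × List Int)) :=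
  match pvRuns list 0 with
  | [] => ([], 0, [])                               -- unreachable under Pre_: list[0]/runs[0] raise on []
  | (x0, _, n0) :: rs =>
    let sNr : Int := if list.headD 0 = valueToLabelSection then 1 else 0
    let labels := List.replicate n0 (if x0 > valueToLabelSection then sNr else 0)
    let st := pvProcB valueToLabelSection (sNr, 0, PySem.Dict.empty, labels) rs
    (st.2.2.2, st.1, st.2.2.1.items)

-- ===== PRECONDITION & SPEC =====
-- A evaluates list[0] first, so it raises IndexError on the empty list; Pre_ excludes only that.
def Pre_BoolSectionDef (list : List Int) (valueToLabelSection : Int) : Prop := list ≠ []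
instance (list : List Int) (valueToLabelSection : Int) : Decidable (Pre_BoolSectionDef list valueToLabelSection) := by unfold Pre_BoolSectionDef; infer_instance
def pvWitness_BoolSectionDef : List Int × Int := ([1, 2, 1, 0, 2], 1)

def Spec_BoolSectionDef (list : List Int) (valueToLabelSection : Int) (out : List Int × Int × (List (Int × List Int))) : Prop := out = BoolSectionDef_alt list valueToLabelSection
instance (list : List Int) (valueToLabelSection : Int) (out : List Int × Int × (List (Int × List Int))) : Decidable (Spec_BoolSectionDef list valueToLabelSection out) := by unfold Spec_BoolSectionDef; infer_instance

-- ===== CLAIM (what is proved, stated in full; the proofs are below) =====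
def Claim_equal_BoolSectionDef : Prop := ∀ (list : List Int) (valueToLabelSection : Int), Dom_BoolSectionDef list valueToLabelSection → Pre_BoolSectionDef list valueToLabelSection → Spec_BoolSectionDef list valueToLabelSection (BoolSectionDef list valueToLabelSection)

-- ===== LEMMAS AND PROOFS =====
-- A's element loop, started on xs with indices from i and current sign `curr`, ends in the same
-- (sectionNr, currSectionStartIdx, dict, sectionNrList) as B's run loop over pvRuns xs i, where a
-- first run equal to `curr` merely extends the current run (labels only, no transition).
lemma pvMain (v : Int) (xs : List Int) : ∀ (i curr sNr cs : Int) (d : PySem.Dict Int (List Int)) (labels : List Int),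
    ((PySem.List.enumerate xs i).foldl (pvStepA v) (curr, sNr, cs, d, labels)).2 =
      (match pvRuns xs i with
       | [] => (sNr, cs, d, labels)
       | (x, s, n) :: rs =>
         if x = curr then
           pvProcB v (sNr, cs, d, labels ++ List.replicate n (if x > v then sNr else 0)) rs
         else
           pvProcB v (sNr, cs, d, labels) ((x, s, n) :: rs)) := by
  induction xs with
  | nil => intro i curr sNr cs d labels; simp [pvRuns, PySem.List.enumerate_nil]
  | cons x t ih =>
    intro i curr sNr cs d labels
    rw [PySem.List.enumerate_cons, List.foldl_cons]
    by_cases hxc : x = curr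
    · -- list[i] == currSign: no transition, label only; the element extends the current run
      subst hxc
      have hstep : pvStepA v (x, sNr, cs, d, labels) (i, x)
          = (x, sNr, cs, d, labels ++ [if x > v then sNr else 0]) := by
        simp [pvStepA]
      rw [hstep, ih]
      rcases h : pvRuns t (i + 1) with _ | ⟨⟨w, s, n⟩, rs⟩
      · simp [pvRuns, h, pvProcB]
      · by_cases hxw : x = w
        · subst hxw
          simp [pvRuns, h, List.replicate_succ, List.append_assoc]
        · have hwx : ¬ w = x := fun hh => hxw hh.symm
          simp [pvRuns, h, hxw, hwx, pvProcB, List.replicate_succ, List.append_assoc]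
    · -- list[i] != currSign: a transition, then the label
      by_cases hxv : x = v
      · -- new section: sectionNr += 1, currSectionStartIdx = i
        subst hxv
        have hcx : ¬ curr = x := fun hh => hxc hh.symm
        have hstep : pvStepA x (curr, sNr, cs, d, labels) (i, x)
            = (x, sNr + 1, i, d, labels ++ [if x > x then sNr + 1 else 0]) := by
          simp [pvStepA, hxc]
        rw [hstep, ih]
        rcases h : pvRuns t (i + 1) with _ | ⟨⟨w, s, n⟩, rs⟩
        · simp [pvRuns, h, hxc, pvProcB]
        · by_cases hxw : x = w
          · subst hxw
            simp [pvRuns, h, hxc, pvProcB, List.replicate_succ, List.append_assoc]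
          · have hwx : ¬ w = x := fun hh => hxw hh.symm
            simp [pvRuns, h, hxc, hxw, hwx, pvProcB, List.replicate_succ, List.append_assoc]
      · -- section end: dict[sectionNr] = [currSectionStartIdx, i]
        have hcx : ¬ curr = x := fun hh => hxc hh.symm
        have hvx : ¬ v = x := fun hh => hxv hh.symm
        have hstep : pvStepA v (curr, sNr, cs, d, labels) (i, x)
            = (x, sNr, cs, d.insert sNr [cs, i], labels ++ [if x > v then sNr else 0]) := by
          simp [pvStepA, hxc, hxv]
        rw [hstep, ih]
        rcases h : pvRuns t (i + 1) with _ | ⟨⟨w, s, n⟩, rs⟩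
        · simp [pvRuns, h, hxc, hxv, pvProcB]
        · by_cases hxw : x = w
          · subst hxw
            simp [pvRuns, h, hxc, hxv, pvProcB, List.replicate_succ, List.append_assoc]
          · have hwx : ¬ w = x := fun hh => hxw hh.symm
            simp [pvRuns, h, hxc, hxv, hxw, hwx, pvProcB, List.replicate_succ,
              List.append_assoc]

-- ===== VERDICT (by name: the statement is the Claim_ definition above) =====
theorem BoolSectionDef_spec : Claim_equal_BoolSectionDef := by
  intro list v _ hpre
  unfold Spec_BoolSectionDef
  rcases list with _ | ⟨x, t⟩
  · exact absurd rfl hpre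
  · simp only [BoolSectionDef, BoolSectionDef_alt, List.headD_cons]
    rw [pvMain]
    rcases h : pvRuns t 1 with _ | ⟨⟨w, s, n⟩, rs⟩
    · simp [pvRuns, h, pvProcB]
    · by_cases hxw : x = w
      · subst hxw
        simp [pvRuns, h]
      · simp [pvRuns, h, hxw]
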